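-- pv_equiv track=rewrite | github.com/kebutsjimuzan-coder/My_codes | longest_word_analyzer.py | find_longest_words
-- ===== SOURCE A (Python) =====
-- def find_longest_words(text_clean):
--     max_len = 0
--     list_long_words = []
--
--     for word in text_clean:
--         # إذا وجدنا كلمة أطول من الطول الحالي الأقصى
--         if len(word) > max_len:
--             max_len = len(word)
--             # إعادة ضبط القائمة لتبدأ بالكلمة الجديدة الأطول
--             list_long_words = [word]
--         # إذا كانت الكلمة مساوية لأقصى طول وصلنا له
--         elif len(word) == max_len and max_len > 0:
--             if word not in list_long_words: # منع التكرار داخل القائمة قبل العد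
--                 list_long_words.append(word)
--
--     return list_long_words
-- ===== SOURCE B (Python) =====
-- def find_longest_words(text_clean):
--     words = list(text_clean)
--     max_len = max((len(w) for w in words), default=0)
--     if max_len == 0:
--         return []
--     return list(dict.fromkeys(w for w in words if len(w) == max_len))
-- ===== Notes on version B (the rewrite author's own statement) =====
-- stated objective: faster
-- what changed: Replaced A's single-pass reset-and-append scan carrying (max_len, list) state — whose 'word not in list' test rescans the result list — with a two-pass shape: compute the maximum length once (default 0), return an empty result when that maximum is 0, then collect the words of that length deduplicated in first-occurrence order via hash-based dict.fromkeys.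
import Mathlib
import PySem

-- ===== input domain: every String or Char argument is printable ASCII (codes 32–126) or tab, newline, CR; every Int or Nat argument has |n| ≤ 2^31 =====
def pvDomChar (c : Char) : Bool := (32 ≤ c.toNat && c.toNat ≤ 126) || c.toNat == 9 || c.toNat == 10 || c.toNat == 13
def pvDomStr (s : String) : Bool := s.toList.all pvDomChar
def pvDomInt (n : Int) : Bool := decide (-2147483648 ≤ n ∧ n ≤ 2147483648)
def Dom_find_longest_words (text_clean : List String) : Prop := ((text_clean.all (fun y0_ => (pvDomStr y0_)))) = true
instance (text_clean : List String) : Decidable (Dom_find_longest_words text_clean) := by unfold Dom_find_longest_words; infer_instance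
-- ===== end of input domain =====

-- B computes the maximum length once and filter+dedups in a second pass (hash-based dedup),
-- instead of A's incremental reset-and-append scan with a linear 'not in' rescan of the result.

-- ===== PORT A =====
-- one loop step of A: state (max_len, list_long_words), branches in A's order
def fliwStep (st : Int × List String) (word : String) : Int × List String :=
  if PySem.Str.len word > st.1 then
    (PySem.Str.len word, [word])
  else if PySem.Str.len word = st.1 ∧ st.1 > 0 then
    (if st.2.contains word then st else (st.1, st.2 ++ [word]))
  else st

def find_longest_words (text_clean : List String) : List String :=
  (text_clean.foldl fliwStep (0, [])).2

-- ===== PORT B =====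
def find_longest_words_alt (text_clean : List String) : List String :=
  let max_len : Int := PySem.List.maxD (text_clean.map PySem.Str.len) (fun v => v) 0
  if max_len = 0 then []
  else PySem.List.dedup (text_clean.filter (fun w => PySem.Str.len w == max_len))

-- ===== PRECONDITION & SPEC =====
def Spec_find_longest_words (text_clean : List String) (out : List String) : Prop := out = find_longest_words_alt text_clean
instance (text_clean : List String) (out : List String) : Decidable (Spec_find_longest_words text_clean out) := by unfold Spec_find_longest_words; infer_instance

-- ===== CLAIM (what is proved, stated in full; the proofs are below) =====
def Claim_equal_find_longest_words : Prop := ∀ (text_clean : List String), Dom_find_longest_words text_clean → Spec_find_longest_words text_clean (find_longest_words text_clean)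

-- ===== LEMMAS AND PROOFS =====

-- every PySem string length is a nonnegative integer
theorem fliw_len_nonneg (w : String) : 0 ≤ PySem.Str.len w := by
  rw [PySem.Str.len_eq]; exact Int.natCast_nonneg _

-- A's loop, started in any reachable state, equals B's compute-max-then-filter-dedup shape
theorem fliw_loop_eq (xs : List String) : ∀ (m : Int) (acc : List String),
    0 ≤ m → (m = 0 → acc = []) →
    (xs.foldl fliwStep (m, acc)).2 =
      (let M := (xs.map PySem.Str.len).foldl max m
       if M = 0 then []
       else if M = m then
         (xs.filter (fun w => PySem.Str.len w == M)).foldl PySem.Set.add acc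
       else
         (xs.filter (fun w => PySem.Str.len w == M)).foldl PySem.Set.add []) := by
  induction xs with
  | nil =>
    intro m acc hm h0
    simp only [List.foldl_nil, List.map_nil, List.filter_nil]
    by_cases h : m = 0
    · simp [h, h0 h]
    · simp [h]
  | cons w ws ih =>
    intro m acc hm h0
    have hlw : 0 ≤ PySem.Str.len w := fliw_len_nonneg w
    have hM : ∀ a : Int, a ≤ (ws.map PySem.Str.len).foldl max a :=
      fun a => (PySem.List.le_foldl_max _ a).1
    simp only [List.foldl_cons, List.map_cons, List.filter_cons, fliwStep]
    by_cases h1 : PySem.Str.len w > m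
    · -- reset: new state (len w, [w])
      rw [if_pos h1, ih (PySem.Str.len w) [w] hlw (by omega),
          show max m (PySem.Str.len w) = PySem.Str.len w from max_eq_right (le_of_lt h1)]
      set M := (ws.map PySem.Str.len).foldl max (PySem.Str.len w) with hMdef
      have hMl : PySem.Str.len w ≤ M := hM _
      rw [if_neg (show ¬ M = 0 by omega), if_neg (show ¬ M = 0 by omega),
          if_neg (show ¬ M = m by omega)]
      by_cases h2 : PySem.Str.len w = M
      · rw [if_pos h2.symm,
            if_pos (show (PySem.Str.len w == M) = true by
              simp only [beq_iff_eq]; exact h2)]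
        simp [PySem.Set.add]
      · rw [if_neg (fun h => h2 h.symm),
            if_neg (show ¬ (PySem.Str.len w == M) = true by
              simp only [beq_iff_eq]; exact h2)]
    · rw [if_neg h1]
      have hlm : PySem.Str.len w ≤ m := le_of_not_gt h1
      by_cases h2 : PySem.Str.len w = m ∧ m > 0
      · -- equal length, dedup-append
        rw [if_pos h2]
        set acc' := if acc.contains w then (m, acc) else (m, acc ++ [w]) with hacc'
        have heq : ws.foldl fliwStep acc' = ws.foldl fliwStep (m, acc'.2) := by
          congr 1
          rw [hacc']; split <;> rfl
        rw [heq, ih m acc'.2 hm (by omega),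
            show max m (PySem.Str.len w) = m from max_eq_left hlm]
        set M := (ws.map PySem.Str.len).foldl max m with hMdef
        have hMm : m ≤ M := hM m
        rw [if_neg (show ¬ M = 0 by omega), if_neg (show ¬ M = 0 by omega)]
        by_cases h3 : M = m
        · rw [if_pos h3, if_pos h3,
              if_pos (show (PySem.Str.len w == M) = true by
                simp only [beq_iff_eq]; omega)]
          rw [List.foldl_cons]
          congr 1
          rw [hacc']
          by_cases hc : w ∈ acc <;>
            simp [PySem.Set.add, PySem.Set.contains, hc]
        · rw [if_neg h3, if_neg h3,
              if_neg (show ¬ (PySem.Str.len w == M) = true by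
                simp only [beq_iff_eq]; omega)]
      · -- shorter word (or all-empty so far): state unchanged
        rw [if_neg h2, ih m acc hm h0,
            show max m (PySem.Str.len w) = m from max_eq_left hlm]
        set M := (ws.map PySem.Str.len).foldl max m with hMdef
        have hMm : m ≤ M := hM m
        by_cases h3 : M = 0
        · rw [if_pos h3, if_pos h3]
        · rw [if_neg h3, if_neg h3]
          have hwM : ¬ (PySem.Str.len w == M) = true := by
            simp only [beq_iff_eq]
            by_cases h4 : M = m <;> omega
          by_cases h4 : M = m
          · rw [if_pos h4, if_pos h4, if_neg hwM]
          · rw [if_neg h4, if_neg h4, if_neg hwM]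

-- B's max(..., default=0) over nonnegative lengths is the running max from 0
theorem fliw_maxD_eq (xs : List String) :
    PySem.List.maxD (xs.map PySem.Str.len) (fun v => v) 0 =
      (xs.map PySem.Str.len).foldl max 0 := by
  cases xs with
  | nil => simp [PySem.List.maxD, PySem.List.max?]
  | cons w ws =>
    have h := PySem.List.max?_id_cons (PySem.Str.len w) (ws.map PySem.Str.len)
    simp only [List.map_cons, PySem.List.maxD, h, Option.getD_some, List.foldl_cons]
    have : max 0 (PySem.Str.len w) = PySem.Str.len w :=
      max_eq_right (fliw_len_nonneg w)
    rw [this]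

-- ===== VERDICT (by name: the statement is the Claim_ definition above) =====
theorem find_longest_words_spec : Claim_equal_find_longest_words := by
  intro xs _
  unfold Spec_find_longest_words find_longest_words find_longest_words_alt
  rw [fliw_maxD_eq, fliw_loop_eq xs 0 [] le_rfl (fun _ => rfl)]
  simp only [PySem.List.dedup, PySem.Set.ofList, PySem.Set.empty]
  by_cases h : (xs.map PySem.Str.len).foldl max 0 = 0
  · simp [h]
  · simp [h]
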